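-- pv_equiv track=rewrite | github.com/davidbrownell/dbrownell_Common | src/dbrownell_Common/Streams/StreamDecorator.py | _EnumLines
-- ===== SOURCE A (Python) =====
-- from typing import Callable, Generator, Iterator, Optional
--
-- def _EnumLines(
--     content: str,
-- ) -> Generator[tuple[str, bool], None, None]:
--     # Scenarios:
--     #   '\n' => ['']
--     #   'a' => ['a']
--     #   'a\nb' => ['a', 'b']
--     #   'a\nb\n' => ['a', 'b', '']
--
--     lines: list[str] = content.split("\n")
--
--     if len(lines) == 1:
--         has_newline = not lines[0]
--
--         yield lines[0], has_newline
--         return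
--
--     if not lines[-1]:
--         final_newline = True
--         del lines[-1]
--     else:
--         final_newline = False
--
--     last_index = len(lines) - 1
--
--     for index, line in enumerate(lines):
--         has_newline = index < last_index or final_newline
--
--         yield line, has_newline
-- ===== SOURCE B (Python) =====
-- def _EnumLines(content):
--     # Single pass over the characters; no split list, no index arithmetic.
--     buffer = []
--     for char in content:
--         if char == "\n":
--             yield "".join(buffer), True
--             buffer = []
--         else:
--             buffer.append(char)
--     if buffer:
--         yield "".join(buffer), False
-- ===== Notes on version B (the rewrite author's own statement) =====
-- stated objective: simpler
-- what changed: Replaces A's split-on-newline-then-enumerate-with-index-arithmetic by a single pass over the characters that flushes a line buffer at each newline and emits a trailing non-empty buffer without a newline flag, never materializing the split list or a last_index.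
-- intended difference: On empty content A yields the single pair ('', True), claiming a newline-terminated line where content has no newline at all; B yields no lines, the intended enumeration of empty content. — e.g. on _EnumLines(""): A returns [("", true)], B returns []
import Mathlib
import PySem

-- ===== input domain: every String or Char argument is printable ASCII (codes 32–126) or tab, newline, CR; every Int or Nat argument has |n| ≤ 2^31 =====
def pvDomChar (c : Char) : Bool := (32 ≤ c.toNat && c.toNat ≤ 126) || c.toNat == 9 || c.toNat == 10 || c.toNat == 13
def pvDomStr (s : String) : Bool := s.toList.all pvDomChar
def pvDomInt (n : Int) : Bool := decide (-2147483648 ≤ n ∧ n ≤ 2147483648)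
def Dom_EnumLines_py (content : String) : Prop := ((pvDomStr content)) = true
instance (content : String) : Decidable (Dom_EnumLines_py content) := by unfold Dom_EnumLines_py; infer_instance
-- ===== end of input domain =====

-- B replaces A's split-then-enumerate with a single-pass character scanner (same cost class; a simpler decomposition).
-- Intended difference: on empty content A yields ('', True) — see D_ below.

-- ===== PORT A =====
-- content.split("\n") with a nonempty separator is PySem.Chars.splitOn on the code points (exact).
def EnumLines_py (content : String) : List (String × Bool) :=
  let lines : List (List Char) := PySem.Chars.splitOn content.toList ['\n']
  if lines.length = 1 then
    [(String.ofList (lines.headD []), decide (lines.headD [] = []))]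
  else
    -- 'if not lines[-1]: final_newline = True; del lines[-1]'
    let final_newline : Bool := decide (lines.getLast? = some [])
    let lines' := if final_newline then lines.dropLast else lines
    let lastIndex : Int := (lines'.length : Int) - 1
    (PySem.List.enumerate lines' 0).map
      (fun iv => (String.ofList iv.2, decide (iv.1 < lastIndex) || final_newline))

-- ===== PORT B =====
-- the for-loop of Source B: buffer of characters, flush on '\n', trailing buffer (if any) without newline
def pvScanB (buf : List Char) : List Char → List (String × Bool)
  | [] => if buf.isEmpty then [] else [(String.ofList buf, false)]
  | c :: rest =>
      if c = '\n' then (String.ofList buf, true) :: pvScanB [] rest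
      else pvScanB (buf ++ [c]) rest

def EnumLines_py_alt (content : String) : List (String × Bool) :=
  pvScanB [] content.toList

-- ===== PRECONDITION & SPEC =====
-- On empty content A yields the single pair ('', True), claiming a newline-terminated line where
-- content has no newline at all; B yields no lines, the intended enumeration of empty content.
def D_EnumLines_py (content : String) : Prop := content = ""
instance (content : String) : Decidable (D_EnumLines_py content) := by unfold D_EnumLines_py; infer_instance

def Spec_EnumLines_py (content : String) (out : List (String × Bool)) : Prop :=
  ¬ D_EnumLines_py content → out = EnumLines_py_alt content
instance (content : String) (out : List (String × Bool)) : Decidable (Spec_EnumLines_py content out) := by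
  unfold Spec_EnumLines_py; infer_instance

def pvDiffWitness_EnumLines_py : String := ""
def pvDiffWitnessOut_EnumLines_py : (List (String × Bool)) × (List (String × Bool)) :=
  ([("", true)], [])

-- ===== CLAIM (what is proved, stated in full; the proofs are below) =====
def Claim_unchanged_EnumLines_py : Prop :=
  ∀ (content : String), Dom_EnumLines_py content → Spec_EnumLines_py content (EnumLines_py content)
def Claim_changed_EnumLines_py : Prop :=
  Dom_EnumLines_py (pvDiffWitness_EnumLines_py) ∧ D_EnumLines_py (pvDiffWitness_EnumLines_py) ∧
  EnumLines_py (pvDiffWitness_EnumLines_py) = pvDiffWitnessOut_EnumLines_py.1 ∧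
  EnumLines_py_alt (pvDiffWitness_EnumLines_py) = pvDiffWitnessOut_EnumLines_py.2 ∧
  pvDiffWitnessOut_EnumLines_py.1 ≠ pvDiffWitnessOut_EnumLines_py.2
def Claim_exact_EnumLines_py : Prop :=
  ∀ (content : String), Dom_EnumLines_py content → D_EnumLines_py content →
    EnumLines_py content ≠ EnumLines_py_alt content

-- ===== LEMMAS AND PROOFS =====

/-- Reference splitter: split on '\n', with `pre` the characters read so far of the current piece. -/
def pvSplitNL (pre : List Char) : List Char → List (List Char)
  | [] => [pre]
  | c :: rest => if c = '\n' then pre :: pvSplitNL [] rest else pvSplitNL (pre ++ [c]) rest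

lemma pvSplitNL_ne_nil (pre : List Char) (cs : List Char) : pvSplitNL pre cs ≠ [] := by
  induction cs generalizing pre with
  | nil => simp [pvSplitNL]
  | cons c rest ih =>
      simp only [pvSplitNL]
      split_ifs <;> simp [ih]

lemma pvSplitNL_singleton (pre cs : List Char) (l : List Char)
    (h : pvSplitNL pre cs = [l]) : l = pre ++ cs := by
  induction cs generalizing pre with
  | nil => simp [pvSplitNL] at h; simp [h]
  | cons c rest ih =>
      simp only [pvSplitNL] at h
      split_ifs at h with hc
      · cases hnil : pvSplitNL ([] : List Char) rest with
        | nil => exact absurd hnil (pvSplitNL_ne_nil _ _)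
        | cons a t => rw [hnil] at h; simp at h
      · have := ih (pre ++ [c]) h
        simp [this]

lemma pvSplitOn_go_eq (cs : List Char) : ∀ (fuel : Nat), cs.length ≤ fuel →
    ∀ (cur : List Char) (acc : List (List Char)),
      PySem.Chars.splitOn.go ['\n'] fuel cs cur acc = acc.reverse ++ pvSplitNL cur.reverse cs := by
  induction cs with
  | nil =>
      intro fuel _ cur acc
      cases fuel <;> simp [PySem.Chars.splitOn.go, pvSplitNL]
  | cons c rest ih =>
      intro fuel hf cur acc
      cases fuel with
      | zero => simp at hf
      | succ f =>
          simp only [PySem.Chars.splitOn.go]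
          by_cases hc : c = '\n'
          · subst hc
            have hpre : List.isPrefixOf ['\n'] ('\n' :: rest) = true := by
              simp [List.isPrefixOf]
            rw [if_pos hpre]
            have : List.drop (['\n'] : List Char).length ('\n' :: rest) = rest := by simp
            rw [this, ih f (by simpa using hf) [] (cur.reverse :: acc)]
            simp [pvSplitNL]
          · have hpre : List.isPrefixOf ['\n'] (c :: rest) = false := by
              simp only [List.isPrefixOf, Bool.and_eq_false_iff, beq_eq_false_iff_ne, ne_eq]
              exact Or.inl fun h => hc h.symm
            rw [if_neg (by simp [hpre])]
            rw [ih f (by simpa using hf) (c :: cur) acc]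
            simp [pvSplitNL, hc]

lemma pvSplitOn_eq (cs : List Char) :
    PySem.Chars.splitOn cs ['\n'] = pvSplitNL [] cs := by
  show PySem.Chars.splitOn.go ['\n'] (cs.length + 1) cs [] [] = _
  rw [pvSplitOn_go_eq cs (cs.length + 1) (by omega) [] []]
  simp

/-- What both programs produce, as a function of the split pieces. -/
def pvEmit : List (List Char) → List (String × Bool)
  | [] => []
  | [l] => if l.isEmpty then [] else [(String.ofList l, false)]
  | l :: rest => (String.ofList l, true) :: pvEmit rest

lemma pvScanB_eq_emit (cs : List Char) : ∀ (buf : List Char),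
    pvScanB buf cs = pvEmit (pvSplitNL buf cs) := by
  induction cs with
  | nil => intro buf; cases buf <;> simp [pvScanB, pvSplitNL, pvEmit]
  | cons c rest ih =>
      intro buf
      simp only [pvScanB, pvSplitNL]
      by_cases hc : c = '\n'
      · rw [if_pos hc, if_pos hc, ih []]
        cases hnil : pvSplitNL ([] : List Char) rest with
        | nil => exact absurd hnil (pvSplitNL_ne_nil _ _)
        | cons a t => simp [pvEmit]
      · rw [if_neg hc, if_neg hc, ih (buf ++ [c])]

lemma pvEmit_last_empty (ls : List (List Char)) :
    pvEmit (ls ++ [[]]) = ls.map (fun l => (String.ofList l, true)) := by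
  induction ls with
  | nil => simp [pvEmit]
  | cons l t ih =>
      cases t with
      | nil => simp [pvEmit, List.isEmpty]
      | cons a t' => simpa [pvEmit] using ih

lemma pvEmit_last_nonempty (ls : List (List Char)) (l : List Char) (hl : l ≠ []) :
    pvEmit (ls ++ [l]) = ls.map (fun x => (String.ofList x, true)) ++ [(String.ofList l, false)] := by
  induction ls with
  | nil => simp [pvEmit, hl]
  | cons a t ih =>
      cases t with
      | nil => simp [pvEmit, hl]
      | cons b t' => simpa [pvEmit] using ih

lemma pvMap_enum_snd {α : Type} (ls : List (List Char)) (s : Int) (g : List Char → α) :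
    (PySem.List.enumerate ls s).map (fun iv => g iv.2) = ls.map g := by
  rw [show (fun iv : Int × List Char => g iv.2) = g ∘ (·.2) from rfl,
    ← List.map_map, PySem.List.map_snd_enumerate]

lemma pvEnum_map_true (ls : List (List Char)) (f : Int) :
    (PySem.List.enumerate ls 0).map
        (fun iv : Int × List Char => (String.ofList iv.2, decide (iv.1 < f) || true)) =
      ls.map (fun l => (String.ofList l, true)) := by
  simp only [Bool.or_true]
  exact pvMap_enum_snd ls 0 (fun x => (String.ofList x, true))

lemma pvEnum_map_last (init : List (List Char)) (last : List Char) (fin : Bool) :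
    (PySem.List.enumerate (init ++ [last]) 0).map
        (fun iv : Int × List Char =>
          (String.ofList iv.2, decide (iv.1 < ((init ++ [last]).length : Int) - 1) || fin)) =
      init.map (fun l => (String.ofList l, true)) ++ [(String.ofList last, fin)] := by
  rw [PySem.List.enumerate_append, List.map_append]
  congr 1
  · rw [List.map_congr_left (g := fun iv : Int × List Char => (String.ofList iv.2, true))]
    · exact pvMap_enum_snd init 0 (fun x => (String.ofList x, true))
    · intro p hp
      rcases (PySem.List.mem_enumerate_iff _ _ _).mp hp with ⟨k, hk, rfl⟩
      have hlt : (0 : Int) + k < ((init ++ [last]).length : Int) - 1 := by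
        simp only [List.length_append, List.length_cons, List.length_nil]
        push_cast
        omega
      simp [hk]
  · rw [PySem.List.enumerate_cons, PySem.List.enumerate_nil]
    simp

lemma pvMain (content : String) (hne : content ≠ "") :
    EnumLines_py content = EnumLines_py_alt content := by
  have hcs : content.toList ≠ [] := fun h => hne (String.toList_eq_nil_iff.mp h)
  unfold EnumLines_py EnumLines_py_alt
  rw [pvScanB_eq_emit, pvSplitOn_eq]
  by_cases h1 : (pvSplitNL [] content.toList).length = 1
  · obtain ⟨l, hl⟩ := List.length_eq_one_iff.mp h1
    have hlcs : l = content.toList := by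
      simpa using pvSplitNL_singleton [] content.toList l hl
    rw [if_pos h1, hl, hlcs]
    simp [pvEmit, hcs, List.isEmpty_iff]
  · rw [if_neg h1]
    rcases List.eq_nil_or_concat' (pvSplitNL [] content.toList) with hnil | ⟨init, last, hconc⟩
    · exact absurd hnil (pvSplitNL_ne_nil _ _)
    · rw [hconc]
      by_cases hlast : last = []
      · subst hlast
        simp only [List.getLast?_concat, decide_true, if_true, List.dropLast_concat]
        rw [pvEnum_map_true, pvEmit_last_empty]
      · have hfin : (decide (some last = some ([] : List Char))) = false := by
          simp [hlast]
        simp only [List.getLast?_concat, hfin, Bool.false_eq_true, if_false]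
        rw [pvEnum_map_last init last false, pvEmit_last_nonempty init last hlast]


-- ===== VERDICT (by name: the statement is the Claim_ definition above) =====
theorem EnumLines_py_spec : Claim_unchanged_EnumLines_py := by
  intro content _ hD
  exact pvMain content hD

theorem EnumLines_py_changed : Claim_changed_EnumLines_py := by
  unfold Claim_changed_EnumLines_py; decide

theorem EnumLines_py_tight : Claim_exact_EnumLines_py := by
  intro content _ hD
  unfold D_EnumLines_py at hD
  subst hD
  decide
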